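-- pv_equiv track=rewrite | github.com/takenosuke-code/TennisAnalyst | railway-service/main.py | _aggregate_angle_labels
-- ===== SOURCE A (Python) =====
-- def _aggregate_angle_labels(labels: list[str]) -> str:
--     """Pick the majority raw label, or 'unknown' if the vote is split.
--
--     We only count non-'unknown' labels toward majority. If every sample is
--     'unknown' (classifier couldn't find court/player), we return 'unknown'.
--     A single dominant label needs STRICT majority of the non-unknown votes
--     -- ties and near-ties fall through to 'unknown' so mixed-angle clips
--     don't get a confident flag they don't deserve.
--     """
--     if not labels:
--         return "unknown"
--     considered = [lbl for lbl in labels if lbl and lbl != "unknown"]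
--     if not considered:
--         return "unknown"
--     counts: dict[str, int] = {}
--     for lbl in considered:
--         counts[lbl] = counts.get(lbl, 0) + 1
--     top_label, top_count = max(counts.items(), key=lambda kv: kv[1])
--     if top_count * 2 > len(considered):
--         return top_label
--     return "unknown"
-- ===== SOURCE B (Python) =====
-- def _aggregate_angle_labels(labels: list[str]) -> str:
--     """Boyer-Moore majority vote over the non-empty, non-'unknown' labels,
--     then one verification pass enforcing the strict-majority threshold."""
--     considered = [lbl for lbl in labels if lbl and lbl != "unknown"]
--     if not considered:
--         return "unknown"
--     candidate = None
--     count = 0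
--     for lbl in considered:
--         if count == 0:
--             candidate = lbl
--             count = 1
--         elif lbl == candidate:
--             count += 1
--         else:
--             count -= 1
--     occurrences = considered.count(candidate)
--     if occurrences * 2 > len(considered):
--         return candidate
--     return "unknown"
-- ===== Notes on version B (the rewrite author's own statement) =====
-- stated objective: faster
-- what changed: Replaces the hash-map histogram plus max-by-count scan with a Boyer-Moore majority-vote pass (single candidate/counter) followed by one verification count enforcing the strict-majority threshold.
import Mathlib
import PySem

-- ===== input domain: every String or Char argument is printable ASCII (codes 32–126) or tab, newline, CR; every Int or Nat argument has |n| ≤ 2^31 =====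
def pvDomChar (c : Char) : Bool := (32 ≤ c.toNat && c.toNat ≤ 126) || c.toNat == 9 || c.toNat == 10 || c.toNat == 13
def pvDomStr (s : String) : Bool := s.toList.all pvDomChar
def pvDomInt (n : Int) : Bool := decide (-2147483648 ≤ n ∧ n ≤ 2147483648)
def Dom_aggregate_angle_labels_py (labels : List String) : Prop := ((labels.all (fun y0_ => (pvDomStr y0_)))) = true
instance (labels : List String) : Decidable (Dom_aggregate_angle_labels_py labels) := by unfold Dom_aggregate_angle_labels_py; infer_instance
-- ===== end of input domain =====

-- B replaces A's counts-dict + max-by-count with a Boyer-Moore majority vote pass plus one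
-- verification count (same O(n) time, O(1) extra space instead of a dict).

-- ===== PORT A =====
def aggregate_angle_labels_py (labels : List String) : String :=
  if labels = [] then "unknown"
  else
    let considered := labels.filter (fun lbl => !(lbl == "") && !(lbl == "unknown"))
    if considered = [] then "unknown"
    else
      let counts : PySem.Dict String Int :=
        considered.foldl (fun d lbl => d.insert lbl (d.getD lbl 0 + 1)) PySem.Dict.empty
      match PySem.List.max? counts.items (fun kv => kv.2) with
      | none => "unknown"  -- unreachable: counts is nonempty here (Python's max never sees [])
      | some (top_label, top_count) =>
          if top_count * 2 > (considered.length : Int) then top_label else "unknown"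

-- ===== PORT B =====
-- one Boyer-Moore voting step: state = (candidate, count)
def bmStep (st : Option String × Nat) (lbl : String) : Option String × Nat :=
  if st.2 = 0 then (some lbl, 1)
  else if some lbl = st.1 then (st.1, st.2 + 1)
  else (st.1, st.2 - 1)

def aggregate_angle_labels_py_alt (labels : List String) : String :=
  let considered := labels.filter (fun lbl => !(lbl == "") && !(lbl == "unknown"))
  if considered = [] then "unknown"
  else
    match (considered.foldl bmStep (none, 0)).1 with
    | none => "unknown"  -- unreachable: considered is nonempty, so a candidate was set
    | some candidate =>
        if PySem.List.count considered candidate * 2 > considered.length then candidate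
        else "unknown"

-- ===== PRECONDITION & SPEC =====
def Spec_aggregate_angle_labels_py (labels : List String) (out : String) : Prop := out = aggregate_angle_labels_py_alt labels
instance (labels : List String) (out : String) : Decidable (Spec_aggregate_angle_labels_py labels out) := by unfold Spec_aggregate_angle_labels_py; infer_instance

-- ===== CLAIM (what is proved, stated in full; the proofs are below) =====
def Claim_equal_aggregate_angle_labels_py : Prop := ∀ (labels : List String), Dom_aggregate_angle_labels_py labels → Spec_aggregate_angle_labels_py labels (aggregate_angle_labels_py labels)

-- ===== LEMMAS AND PROOFS =====

-- Boyer-Moore invariant: a strict majority (weighted by the current state) survives the fold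
lemma bm_majority (xs : List String) (m : String) :
    ∀ (st : Option String × Nat),
      xs.length + st.2 < 2 * xs.count m + (if st.1 = some m then 2 * st.2 else 0) →
      (xs.foldl bmStep st).1 = some m := by
  induction xs with
  | nil =>
      rintro ⟨c?, k⟩ h
      simp only [List.length_nil, List.count_nil, List.foldl_nil]
      by_cases hc : c? = some m
      · exact hc
      · simp [hc] at h
  | cons x t ih =>
      rintro ⟨c?, k⟩ h
      simp only [List.length_cons, List.count_cons] at h
      simp only [List.foldl_cons]
      by_cases h0 : k = 0
      · have hstep : bmStep (c?, k) x = (some x, 1) := by simp [bmStep, h0]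
        rw [hstep]; apply ih
        by_cases hxm : x = m
        · subst hxm
          simp at h ⊢
          split at h <;> omega
        · simp [hxm] at h ⊢
          split at h <;> omega
      · by_cases hxc : some x = c?
        · have hstep : bmStep (c?, k) x = (c?, k + 1) := by simp [bmStep, h0, hxc]
          rw [hstep]; apply ih
          by_cases hcm : c? = some m
          · have hxm : x = m := by
              apply Option.some.inj; rw [hxc, hcm]
            simp [hcm, hxm] at h ⊢; omega
          · have hxm : x ≠ m := fun he => hcm (by rw [← hxc, he])
            simp [hcm, hxm] at h ⊢; omega
        · have hstep : bmStep (c?, k) x = (c?, k - 1) := by simp [bmStep, h0, hxc]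
          rw [hstep]; apply ih
          by_cases hcm : c? = some m
          · have hxm : x ≠ m := fun he => hxc (by rw [hcm, he])
            simp [hcm, hxm] at h ⊢; omega
          · by_cases hxm : x = m <;> simp [hcm, hxm] at h ⊢ <;> omega

-- after folding a nonempty-started state the candidate is set
lemma bm_isSome (xs : List String) :
    ∀ (c : String) (k : Nat), ∃ c', (xs.foldl bmStep (some c, k)).1 = some c' := by
  induction xs with
  | nil => intro c k; exact ⟨c, rfl⟩
  | cons x t ih =>
      intro c k
      simp only [List.foldl_cons]
      unfold bmStep
      by_cases h0 : k = 0
      · simpa [h0] using ih x 1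
      · by_cases hxc : some x = some c
        · simpa [h0, hxc] using ih c (k + 1)
        · simpa [h0, hxc] using ih c (k - 1)

theorem aggregate_angle_labels_py_spec_aux (labels : List String) :
    aggregate_angle_labels_py labels = aggregate_angle_labels_py_alt labels := by
  unfold aggregate_angle_labels_py aggregate_angle_labels_py_alt
  by_cases hnil : labels = []
  · simp [hnil]
  · simp only [if_neg hnil]
    set cs := labels.filter (fun lbl => !(lbl == "") && !(lbl == "unknown")) with hcs
    by_cases hce : cs = []
    · simp [hce]
    · simp only [if_neg hce]
      -- A's counts dict is the counter of cs
      rw [PySem.Dict.foldl_insert_getD_add_one_eq_counter]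
      -- B's candidate exists
      obtain ⟨c0, rest, hcons⟩ := List.exists_cons_of_ne_nil hce
      have hstep1 : bmStep (none, 0) c0 = (some c0, 1) := by simp [bmStep]
      obtain ⟨cand, hcand⟩ : ∃ c', (cs.foldl bmStep (none, 0)).1 = some c' := by
        rw [hcons]; simp only [List.foldl_cons, hstep1]; exact bm_isSome rest c0 1
      rw [hcand]
      -- A's max is some: items nonempty
      have hitems : (PySem.Dict.counter cs).items
          = (PySem.Set.ofList cs).map (fun k => (k, (cs.count k : Int))) := by
        simpa using PySem.Dict.items_counter cs
      have hc0 : c0 ∈ PySem.Set.ofList cs :=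
        (PySem.Set.mem_ofList _ _).mpr (by rw [hcons]; exact List.mem_cons_self)
      have hitems_ne : (PySem.Dict.counter cs).items ≠ [] := by
        rw [hitems]
        intro hE
        rw [List.map_eq_nil_iff.mp hE] at hc0
        simp at hc0
      obtain ⟨tp, htp⟩ : ∃ p, PySem.List.max? (PySem.Dict.counter cs).items (fun kv => kv.2) = some p := by
        cases hmx : PySem.List.max? (PySem.Dict.counter cs).items (fun kv => kv.2) with
        | none => exact absurd ((PySem.List.max?_eq_none_iff _ _).mp hmx) hitems_ne
        | some p => exact ⟨p, rfl⟩
      rw [htp]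
      obtain ⟨tl, tc⟩ := tp
      -- tc = count of tl, tl ∈ cs
      have hmem := PySem.List.max?_mem htp
      rw [hitems] at hmem
      obtain ⟨k, hk, hkeq⟩ := List.mem_map.mp hmem
      have htl : tl = k := (Prod.mk.injEq _ _ _ _ ▸ hkeq.symm).1
      have htc : tc = (cs.count tl : Int) := by
        have := (Prod.mk.injEq _ _ _ _ ▸ hkeq.symm).2
        rw [htl]; exact this
      have htl_mem : tl ∈ cs := by rw [htl]; exact (PySem.Set.mem_ofList _ _).mp hk
      -- maximality: every element's count ≤ count tl
      have hmax : ∀ y ∈ cs, cs.count y ≤ cs.count tl := by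
        intro y hy
        have hyS : y ∈ PySem.Set.ofList cs := (PySem.Set.mem_ofList _ _).mpr hy
        have := PySem.List.max?_isMax htp (y, (cs.count y : Int))
          (by rw [hitems]; exact List.mem_map.mpr ⟨y, hyS, rfl⟩)
        simp only at this
        rw [htc] at this
        exact_mod_cast this
      have hcountB : PySem.List.count cs cand = cs.count cand := by
        simp [PySem.List.count_eq]
      by_cases hmaj : 2 * cs.count tl > cs.length
      · -- a strict majority exists: it is tl, and Boyer-Moore finds it
        have hbm : (cs.foldl bmStep (none, 0)).1 = some tl := by
          apply bm_majority
          simp; omega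
        have hct : cand = tl := Option.some.inj (hcand.symm.trans hbm)
        have hA : tc * 2 > (cs.length : Int) := by rw [htc]; push_cast; omega
        have hB : PySem.List.count cs tl * 2 > cs.length := by
          rw [hct] at hcountB; rw [hcountB]; omega
        simp only [if_pos hA, if_pos hB, hct]
      · -- no strict majority: both return "unknown"
        have hA : ¬ tc * 2 > (cs.length : Int) := by rw [htc]; push_cast; omega
        have hB : ¬ PySem.List.count cs cand * 2 > cs.length := by
          rw [hcountB]
          intro hgt
          have hc_mem : cand ∈ cs := by
            rw [← List.count_pos_iff]; omega
          have := hmax cand hc_mem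
          omega
        simp only [if_neg hA, if_neg hB]

-- ===== VERDICT (by name: the statement is the Claim_ definition above) =====
theorem aggregate_angle_labels_py_spec : Claim_equal_aggregate_angle_labels_py := by
  intro labels _
  exact aggregate_angle_labels_py_spec_aux labels
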